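-- pv_equiv track=rewrite | github.com/QoL15155/Bitburner | contracts/array_jumping_game.py | do_jump
-- ===== SOURCE A (Python) =====
-- def do_jump(input, position: int) -> list[int] | None:
--     max_jump = input[position]
--
--     if position + max_jump >= len(input) - 1:
--         return [position]
--
--     for i in range(max_jump):
--         result = do_jump(input, position + i + 1)
--         if result is not None:
--             result.insert(0, position)
--             return result
--
--     return None
-- ===== SOURCE B (Python) =====
-- def do_jump(input, position: int) -> list[int] | None:
--     n = len(input)
--
--     # reach[p]: can the end be reached from p (computed right-to-left)
--     reach = [False] * n
--     p = n - 1
--     while p >= 0: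
--         jump = input[p]
--         if p + jump >= n - 1:
--             reach[p] = True
--         else:
--             limit = min(p + jump, n - 1)
--             q = p + 1
--             ok = False
--             while q <= limit:
--                 if reach[q]:
--                     ok = True
--                     break
--                 q += 1
--             reach[p] = ok
--         p -= 1
--
--     if not reach[position]:
--         return None
--
--     # greedy reconstruction: always step to the nearest position that can reach the end
--     path = [position]
--     p = position
--     while p + input[p] < n - 1:
--         q = p + 1
--         while not reach[q]:
--             q += 1
--         path.append(q)
--         p = q
--     return path
-- ===== Notes on version B (the rewrite author's own statement) =====
-- stated objective: alternative
-- what changed: Replaces A's memoless depth-first backtracking recursion with a right-to-left boolean reachability table followed by a greedy nearest-reachable-position path reconstruction (iterative, no recursion, no backtracking).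
-- outside the precondition, e.g. on do_jump([0, 5, 0, 1], -1): A returns None, B returns [-1, 1]; on do_jump([1, 2], 5): A raises IndexError, B raises IndexError
import Mathlib
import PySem

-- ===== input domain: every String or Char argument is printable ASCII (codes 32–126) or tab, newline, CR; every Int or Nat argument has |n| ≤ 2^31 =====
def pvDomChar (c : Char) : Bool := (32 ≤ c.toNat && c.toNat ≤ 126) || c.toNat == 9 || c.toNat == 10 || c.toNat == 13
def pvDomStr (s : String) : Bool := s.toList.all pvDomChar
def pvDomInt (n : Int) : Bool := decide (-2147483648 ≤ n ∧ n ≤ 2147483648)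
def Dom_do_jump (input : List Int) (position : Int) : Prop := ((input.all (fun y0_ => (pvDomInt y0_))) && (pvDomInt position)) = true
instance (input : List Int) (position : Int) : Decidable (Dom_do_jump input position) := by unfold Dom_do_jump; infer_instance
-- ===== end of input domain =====

-- B replaces A's depth-first backtracking recursion by a reachability table plus greedy
-- path reconstruction (objective: alternative algorithm); return values proved equal on Pre_.


-- ===== PORT A =====
-- A's recursion, made total by a fuel counter (recursion depth is < input.length + 1,
-- since the recursive position strictly increases and stays below len - 1).
mutual
def doJumpFuel (input : List Int) : Nat → Int → Option (List Int)
  | 0, _ => none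
  | fuel + 1, position =>
    match PySem.List.pyGet? input position with
    | none => none          -- input[position] raises IndexError: excluded by Pre_
    | some maxJump =>
      if position + maxJump ≥ (input.length : Int) - 1 then some [position]
      else doJumpTry input fuel position (PySem.List.pyRange 0 maxJump 1)
termination_by fuel _ => (fuel, 0)

-- the 'for i in range(max_jump)' loop with its early return
def doJumpTry (input : List Int) (fuel : Nat) (position : Int) : List Int → Option (List Int)
  | [] => none
  | i :: rest =>
    match doJumpFuel input fuel (position + i + 1) with
    | some result => some (position :: result)
    | none => doJumpTry input fuel position rest
termination_by l => (fuel, l.length + 1)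
end

def do_jump (input : List Int) (position : Int) : Option (List Int) :=
  doJumpFuel input (input.length + 1) position

-- ===== PORT B =====
-- inner 'while q <= limit: if reach[q]: ok = True; break; q += 1' scan
def reachScan (reach : List Bool) (limit : Int) : Int → Nat → Bool
  | _, 0 => false
  | q, f + 1 =>
    if q ≤ limit then
      (if PySem.List.pyGetD reach q false then true else reachScan reach limit (q + 1) f)
    else false

-- the 'while p >= 0: … p -= 1' build loop; argument k is p + 1
def buildLoop (input : List Int) : List Bool → Nat → List Bool
  | reach, 0 => reach
  | reach, k + 1 =>
    let p : Int := (k : Int)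
    let jump := PySem.List.pyGetD input p 0
    let reach' :=
      if p + jump ≥ (input.length : Int) - 1 then PySem.List.pySetD reach p true
      else
        let limit := min (p + jump) ((input.length : Int) - 1)
        PySem.List.pySetD reach p (reachScan reach limit (p + 1) input.length)
    buildLoop input reach' k

-- 'while not reach[q]: q += 1' (fuel input.length always suffices when a reachable position exists)
def findNext (reach : List Bool) : Int → Nat → Int
  | q, 0 => q
  | q, f + 1 => if PySem.List.pyGetD reach q false then q else findNext reach (q + 1) f

-- the reconstruction 'while p + input[p] < n - 1' loop
def buildPath (input : List Int) (reach : List Bool) : Int → List Int → Nat → List Int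
  | _, path, 0 => path
  | p, path, f + 1 =>
    if p + PySem.List.pyGetD input p 0 < (input.length : Int) - 1 then
      let q := findNext reach (p + 1) input.length
      buildPath input reach q (path ++ [q]) f
    else path

def do_jump_alt (input : List Int) (position : Int) : Option (List Int) :=
  let reach := buildLoop input (List.replicate input.length false) input.length
  if PySem.List.pyGetD reach position false then
    some (buildPath input reach position [position] (input.length + 1))
  else none

-- ===== PRECONDITION & SPEC =====
-- Pre_ restricts to in-range start indices: position ≥ len(input) raises IndexError in both
-- programs, and a negative position is outside the task's natural domain (a start index) —
-- there Python's negative-index wraparound gives A an accidental value.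
def Pre_do_jump (input : List Int) (position : Int) : Prop :=
  0 ≤ position ∧ position < (input.length : Int)
instance (input : List Int) (position : Int) : Decidable (Pre_do_jump input position) := by
  unfold Pre_do_jump; infer_instance

def pvWitness_do_jump : List Int × Int := ([2, 3, 1, 1, 4], 0)

def Spec_do_jump (input : List Int) (position : Int) (out : Option (List Int)) : Prop := out = do_jump_alt input position
instance (input : List Int) (position : Int) (out : Option (List Int)) : Decidable (Spec_do_jump input position out) := by unfold Spec_do_jump; infer_instance

-- ===== CLAIM (what is proved, stated in full; the proofs are below) =====
def Claim_equal_do_jump : Prop := ∀ (input : List Int) (position : Int), Dom_do_jump input position → Pre_do_jump input position → Spec_do_jump input position (do_jump input position)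

-- ===== LEMMAS AND PROOFS =====

lemma pyGet?_in (xs : List Int) (p : Int) (h0 : 0 ≤ p) (h1 : p.toNat < xs.length) :
    PySem.List.pyGet? xs p = some (PySem.List.pyGetD xs p 0) := by
  rw [PySem.List.pyGetD_eq_getElem xs 0 h0 (by omega)]
  have h := PySem.List.pyGet?_natCast xs p.toNat
  rw [show ((p.toNat : Nat) : Int) = p by omega] at h
  rw [h, List.getElem?_eq_getElem h1]

lemma pyGet?_out (xs : List Int) (p : Int) (h0 : 0 ≤ p) (h1 : ¬ p.toNat < xs.length) :
    PySem.List.pyGet? xs p = none := by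
  have h := PySem.List.pyGet?_natCast xs p.toNat
  rw [show ((p.toNat : Nat) : Int) = p by omega] at h
  rw [h, List.getElem?_eq_none]; omega

-- canonical A-result with the top-level fuel
def Fres (input : List Int) (p : Int) : Option (List Int) :=
  doJumpFuel input (input.length + 1) p

lemma A_fuel (input : List Int) :
    ∀ f1 f2 p, 0 ≤ p → input.length - p.toNat < f1 → input.length - p.toNat < f2 →
      doJumpFuel input f1 p = doJumpFuel input f2 p := by
  intro f1
  induction f1 with
  | zero => intro f2 p _ h1 _; omega
  | succ f1 ih =>
    intro f2 p hp h1 h2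
    match f2, h2 with
    | f2 + 1, h2 =>
      rw [doJumpFuel, doJumpFuel]
      by_cases hin : p.toNat < input.length
      · rw [pyGet?_in input p hp hin]
        dsimp only
        by_cases hb : p + PySem.List.pyGetD input p 0 ≥ (input.length : Int) - 1
        · rw [if_pos hb, if_pos hb]
        · rw [if_neg hb, if_neg hb]
          have hbl := lt_of_not_ge hb
          have key : ∀ lst : List Int,
              (∀ i ∈ lst, 0 ≤ i ∧ p + i + 1 < (input.length : Int)) →
              doJumpTry input f1 p lst = doJumpTry input f2 p lst := by
            intro lst
            induction lst with
            | nil => intro _; rw [doJumpTry, doJumpTry]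
            | cons i rest ihl =>
              intro hmem
              obtain ⟨hi0, hi1⟩ := hmem i (List.mem_cons_self ..)
              rw [doJumpTry, doJumpTry]
              have heq : doJumpFuel input f1 (p + i + 1) = doJumpFuel input f2 (p + i + 1) :=
                ih f2 (p + i + 1) (by omega) (by omega) (by omega)
              rw [heq]
              cases doJumpFuel input f2 (p + i + 1) with
              | some r => rfl
              | none => exact ihl (fun j hj => hmem j (List.mem_cons_of_mem _ hj))
          apply key
          intro i hi
          rw [PySem.List.mem_pyRange_one] at hi
          exact ⟨hi.1, by omega⟩
      · rw [pyGet?_out input p hp hin]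

lemma try_first_some (input : List Int) (f : Nat) (p : Int) :
    ∀ lst : List Int, lst.Pairwise (· < ·) →
      ∀ l, doJumpTry input f p lst = some l →
        ∃ i ∈ lst, (∃ r, doJumpFuel input f (p + i + 1) = some r ∧ l = p :: r) ∧
          ∀ j ∈ lst, j < i → doJumpFuel input f (p + j + 1) = none := by
  intro lst
  induction lst with
  | nil => intro _ l h; simp [doJumpTry] at h
  | cons i0 rest ih =>
    intro hpw l h
    rw [doJumpTry] at h
    cases hc : doJumpFuel input f (p + i0 + 1) with
    | some r =>
      rw [hc] at h
      cases h
      refine ⟨i0, List.mem_cons_self .., ⟨r, hc, rfl⟩, ?_⟩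
      intro j hj hlt
      rcases List.mem_cons.mp hj with rfl | hj'
      · omega
      · have := (List.pairwise_cons.mp hpw).1 j hj'
        omega
    | none =>
      rw [hc] at h
      obtain ⟨i, hmem, hval, hnone⟩ := ih (List.pairwise_cons.mp hpw).2 l h
      refine ⟨i, List.mem_cons_of_mem _ hmem, hval, ?_⟩
      intro j hj hlt
      rcases List.mem_cons.mp hj with rfl | hj'
      · exact hc
      · exact hnone j hj' hlt

lemma try_isSome (input : List Int) (f : Nat) (p : Int) :
    ∀ lst : List Int,
      (doJumpTry input f p lst).isSome = true ↔
        ∃ i ∈ lst, (doJumpFuel input f (p + i + 1)).isSome = true := by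
  intro lst
  induction lst with
  | nil => simp [doJumpTry]
  | cons i rest ih =>
    rw [doJumpTry]
    cases h : doJumpFuel input f (p + i + 1) with
    | some r => simp [h]
    | none => simp [h, ih]

lemma shape_lemma (input : List Int) :
    ∀ f p l, doJumpFuel input f p = some l → ∃ t, l = p :: t := by
  intro f p l h
  match f with
  | 0 => simp [doJumpFuel] at h
  | f + 1 =>
    rw [doJumpFuel] at h
    cases hg : PySem.List.pyGet? input p with
    | none => rw [hg] at h; simp at h
    | some mj =>
      rw [hg] at h
      dsimp only at h
      by_cases hb : p + mj ≥ (input.length : Int) - 1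
      · rw [if_pos hb] at h
        cases h
        exact ⟨[], rfl⟩
      · rw [if_neg hb] at h
        clear hg hb
        revert h
        generalize PySem.List.pyRange 0 mj 1 = L
        induction L with
        | nil => intro h; simp [doJumpTry] at h
        | cons i rest ih =>
          intro h
          rw [doJumpTry] at h
          cases hc : doJumpFuel input f (p + i + 1) with
          | some r => rw [hc] at h; cases h; exact ⟨r, rfl⟩
          | none => rw [hc] at h; exact ih h

lemma buildLoop_length (input : List Int) :
    ∀ k s, (buildLoop input s k).length = List.length s := by
  intro k
  induction k with
  | zero => intro s; rfl
  | succ k ih =>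
    intro s
    rw [buildLoop]
    split <;> rw [ih] <;> simp

lemma reachScan_spec (s : List Bool) (limit : Int) :
    ∀ (f : Nat) (q : Int), limit < q + (f : Int) →
      (reachScan s limit q f = true ↔
        ∃ r : Int, q ≤ r ∧ r ≤ limit ∧ PySem.List.pyGetD s r false = true) := by
  intro f
  induction f with
  | zero =>
    intro q hf
    simp only [reachScan]
    constructor
    · intro h; simp at h
    · rintro ⟨r, h1, h2, _⟩; omega
  | succ f ih =>
    intro q hf
    rw [reachScan]
    by_cases hq : q ≤ limit
    · rw [if_pos hq]
      by_cases hg : PySem.List.pyGetD s q false = true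
      · exact iff_of_true (by simp [hg]) ⟨q, le_refl q, hq, hg⟩
      · rw [if_neg (by simp [hg])]
        rw [ih (q + 1) (by push_cast at hf ⊢; omega)]
        constructor
        · rintro ⟨r, h1, h2, h3⟩; exact ⟨r, by omega, h2, h3⟩
        · rintro ⟨r, h1, h2, h3⟩
          refine ⟨r, ?_, h2, h3⟩
          rcases eq_or_lt_of_le h1 with he | hl
          · exact absurd (he ▸ h3) (by simp [hg])
          · omega
    · rw [if_neg hq]
      constructor
      · intro h; simp at h
      · rintro ⟨r, h1, h2, _⟩; omega

lemma build_correct (input : List Int) :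
    ∀ k, k ≤ input.length → ∀ s : List Bool, s.length = input.length →
      (∀ q : Nat, k ≤ q → q < input.length → s.getD q false = (Fres input (q : Int)).isSome) →
      ∀ q : Nat, q < input.length →
        (buildLoop input s k).getD q false = (Fres input (q : Int)).isSome := by
  intro k
  induction k with
  | zero =>
    intro _ s _ hs q hq
    rw [buildLoop]
    exact hs q (Nat.zero_le q) hq
  | succ k ihk =>
    intro hk s hlen hs q hq
    have hkn : k < input.length := by omega
    have hget := pyGet?_in input (k : Int) (by positivity) (by omega)
    rw [buildLoop]
    dsimp only
    by_cases hb : (k : Int) + PySem.List.pyGetD input (k : Int) 0 ≥ (input.length : Int) - 1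
    · rw [if_pos hb, PySem.List.pySetD_natCast]
      refine ihk (by omega) _ (by simp [hlen]) ?_ q hq
      intro q' hq1 hq2
      rcases Nat.eq_or_lt_of_le hq1 with rfl | hlt
      · rw [List.getD_eq_getElem?_getD, List.getElem?_set_self (by omega), Option.getD_some]
        symm
        unfold Fres
        rw [doJumpFuel, hget]
        dsimp only
        rw [if_pos hb]
        rfl
      · rw [List.getD_eq_getElem?_getD, List.getElem?_set_ne (by omega),
            ← List.getD_eq_getElem?_getD]
        exact hs q' (by omega) hq2
    · rw [if_neg hb, PySem.List.pySetD_natCast]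
      have hbl := lt_of_not_ge hb
      refine ihk (by omega) _ (by simp [hlen]) ?_ q hq
      intro q' hq1 hq2
      rcases Nat.eq_or_lt_of_le hq1 with rfl | hlt
      · rw [List.getD_eq_getElem?_getD, List.getElem?_set_self (by omega), Option.getD_some,
            min_eq_left (by omega)]
        symm
        unfold Fres
        rw [doJumpFuel, hget]
        dsimp only
        rw [if_neg hb]
        rw [Bool.eq_iff_iff, try_isSome,
            reachScan_spec s ((k : Int) + PySem.List.pyGetD input (k : Int) 0) input.length
              ((k : Int) + 1) (by omega)]
        constructor
        · rintro ⟨i, hi, hsome⟩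
          rw [PySem.List.mem_pyRange_one] at hi
          refine ⟨(k : Int) + i + 1, by omega, by omega, ?_⟩
          have hrn : ((k : Int) + i + 1).toNat < input.length := by omega
          rw [PySem.List.pyGetD_eq_getElem s false (by omega) (by rw [hlen]; omega),
              ← List.getD_eq_getElem _ _ (by rw [hlen]; omega)]
          rw [hs ((k : Int) + i + 1).toNat (by omega) hrn]
          rw [show ((((k : Int) + i + 1).toNat : Nat) : Int) = (k : Int) + i + 1 by omega]
          unfold Fres
          rw [A_fuel input (input.length + 1) input.length ((k : Int) + i + 1)
                (by omega) (by omega) (by omega)]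
          exact hsome
        · rintro ⟨r, hr1, hr2, hr3⟩
          refine ⟨r - (k : Int) - 1, by rw [PySem.List.mem_pyRange_one]; omega, ?_⟩
          rw [show (k : Int) + (r - (k : Int) - 1) + 1 = r by ring]
          have hrn : r.toNat < input.length := by omega
          rw [PySem.List.pyGetD_eq_getElem s false (by omega) (by rw [hlen]; omega),
              ← List.getD_eq_getElem _ _ (by rw [hlen]; omega)] at hr3
          rw [hs r.toNat (by omega) hrn] at hr3
          rw [show ((r.toNat : Nat) : Int) = r by omega] at hr3
          unfold Fres at hr3
          rw [A_fuel input (input.length + 1) input.length r (by omega) (by omega) (by omega)] at hr3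
          exact hr3
      · rw [List.getD_eq_getElem?_getD, List.getElem?_set_ne (by omega),
            ← List.getD_eq_getElem?_getD]
        exact hs q' (by omega) hq2

lemma findNext_spec (reach : List Bool) :
    ∀ (f : Nat) (q target : Int), q ≤ target → target < q + (f : Int) →
      (∀ r : Int, q ≤ r → r < target → PySem.List.pyGetD reach r false = false) →
      PySem.List.pyGetD reach target false = true →
      findNext reach q f = target := by
  intro f
  induction f with
  | zero => intro q target h1 h2 _ _; simp at h2; omega
  | succ f ih =>
    intro q target h1 h2 hnone htgt
    rw [findNext]
    rcases eq_or_lt_of_le h1 with he | hl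
    · rw [he, htgt]; simp
    · rw [hnone q (le_refl q) hl]
      simp only [Bool.false_eq_true, if_false]
      exact ih (q + 1) target (by omega) (by push_cast at h2 ⊢; omega)
        (fun r hr1 hr2 => hnone r (by omega) hr2) htgt

lemma path_correct (input : List Int) (reach : List Bool)
    (hlenr : reach.length = input.length)
    (hreach : ∀ q : Nat, q < input.length →
      reach.getD q false = (Fres input (q : Int)).isSome) :
    ∀ d p t path f fb, 0 ≤ p → p < (input.length : Int) →
      input.length - p.toNat ≤ d → input.length - p.toNat < f → input.length - p.toNat < fb →
      doJumpFuel input f p = some (p :: t) →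
      buildPath input reach p path fb = path ++ t := by
  intro d
  induction d with
  | zero => intro p t path f fb h0 h1 h2 _ _ _; omega
  | succ d ihd =>
    intro p t path f fb h0 h1 hd hf hfb hA
    match f, hf with
    | f + 1, hf =>
    match fb, hfb with
    | fb + 1, hfb =>
    rw [doJumpFuel, pyGet?_in input p h0 (by omega)] at hA
    dsimp only at hA
    rw [buildPath]
    by_cases hb : p + PySem.List.pyGetD input p 0 ≥ (input.length : Int) - 1
    · rw [if_pos hb] at hA
      rw [if_neg (not_lt.mpr hb)]
      have ht : [p] = p :: t := by injection hA
      have ht2 : ([] : List Int) = t := by injection ht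
      rw [← ht2, List.append_nil]
    · rw [if_neg hb] at hA
      have hbl := lt_of_not_ge hb
      obtain ⟨i, hmem, ⟨r, hr, hlr⟩, hnone⟩ :=
        try_first_some input f p _ (PySem.List.pairwise_lt_pyRange_one 0 _) _ hA
      rw [PySem.List.mem_pyRange_one] at hmem
      have htr : t = r := by
        have h2 : p :: t = p :: r := hlr
        injection h2
      subst htr
      have hfind : findNext reach (p + 1) input.length = p + i + 1 := by
        apply findNext_spec reach input.length (p + 1) (p + i + 1) (by omega)
          (by omega)
        · intro r' hr1 hr2
          have hj : doJumpFuel input f (p + (r' - p - 1) + 1) = none :=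
            hnone (r' - p - 1) (by rw [PySem.List.mem_pyRange_one]; omega) (by omega)
          rw [show p + (r' - p - 1) + 1 = r' by ring] at hj
          rw [PySem.List.pyGetD_eq_getElem reach false (by omega) (by rw [hlenr]; omega),
              ← List.getD_eq_getElem _ _ (by rw [hlenr]; omega)]
          rw [hreach r'.toNat (by omega)]
          rw [show ((r'.toNat : Nat) : Int) = r' by omega]
          unfold Fres
          rw [A_fuel input (input.length + 1) f r' (by omega) (by omega) (by omega), hj]
          rfl
        · rw [PySem.List.pyGetD_eq_getElem reach false (by omega) (by rw [hlenr]; omega),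
              ← List.getD_eq_getElem _ _ (by rw [hlenr]; omega)]
          rw [hreach (p + i + 1).toNat (by omega)]
          rw [show (((p + i + 1).toNat : Nat) : Int) = p + i + 1 by omega]
          unfold Fres
          rw [A_fuel input (input.length + 1) f (p + i + 1) (by omega) (by omega) (by omega), hr]
          rfl
      rw [if_pos (lt_of_not_ge hb)]
      dsimp only
      rw [hfind]
      obtain ⟨t', rfl⟩ := shape_lemma input f (p + i + 1) t hr
      rw [ihd (p + i + 1) t' (path ++ [p + i + 1]) (f + 1) fb (by omega) (by omega) (by omega)
            (by omega) (by omega) (by rw [← A_fuel input f (f + 1) (p + i + 1) (by omega) (by omega) (by omega)]; exact hr)]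
      simp

-- ===== VERDICT (by name: the statement is the Claim_ definition above) =====
theorem do_jump_spec : Claim_equal_do_jump := by
  intro input position hdom hpre
  obtain ⟨h0, hlt⟩ := hpre
  have hreach := build_correct input input.length (le_refl _)
      (List.replicate input.length false) (by simp)
      (fun q hq hq' => absurd hq' (by omega))
  show do_jump input position = do_jump_alt input position
  unfold do_jump do_jump_alt
  dsimp only
  have hlenr : (buildLoop input (List.replicate input.length false) input.length).length
      = input.length := by rw [buildLoop_length]; simp
  have hpos : PySem.List.pyGetD
      (buildLoop input (List.replicate input.length false) input.length) position false
      = (Fres input position).isSome := by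
    rw [PySem.List.pyGetD_eq_getElem _ false h0 (by rw [hlenr]; exact_mod_cast hlt),
        ← List.getD_eq_getElem _ _ (by rw [hlenr]; omega)]
    have h := hreach position.toNat (by omega)
    rw [show ((position.toNat : Nat) : Int) = position by omega] at h
    exact h
  cases hF : Fres input position with
  | none =>
    rw [hF] at hpos
    rw [if_neg (by simp [hpos])]
    exact hF
  | some l =>
    rw [hF] at hpos
    rw [if_pos (by simp [hpos])]
    obtain ⟨t, rfl⟩ := shape_lemma input (input.length + 1) position l hF
    rw [path_correct input _ hlenr hreach input.length position t [position]
          (input.length + 1) (input.length + 1) h0 hlt (by omega) (by omega) (by omega) hF]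
    exact hF
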